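-- pv_equiv track=rewrite | github.com/yougi8/CodingTestStudy | 프로그래머스/택배상자.py | solution
-- ===== SOURCE A (Python) =====
-- def solution(order):
--     answer = 0
--     n = len(order)
--     sub = []
--
--     idx = 1
--     flag = 0
--
--     while idx <= n:
--         sub.append(idx)
--
--         while sub and sub[-1] == order[flag]:
--             answer += 1
--             sub.pop()
--             flag += 1
--         idx += 1
--
--     return answer
-- ===== SOURCE B (Python) =====
-- def solution(order):
--     n = len(order)
--     answer = 0
--     stack = []
--     cur = 1  # next box to push
--     for v in order:
--         while cur <= v and cur <= n:
--             stack.append(cur)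
--             cur += 1
--         if stack and stack[-1] == v:
--             stack.pop()
--             answer += 1
--         else:
--             break
--     return answer
-- ===== Notes on version B (the rewrite author's own statement) =====
-- stated objective: alternative
-- what changed: B iterates over the target sequence with lazy pushing (push up to the requested box, pop on match, break on first impossible request) instead of A's push-driven outer loop over box indices with a greedy inner pop loop; B stops early on unrealizable orders.
import Mathlib
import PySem

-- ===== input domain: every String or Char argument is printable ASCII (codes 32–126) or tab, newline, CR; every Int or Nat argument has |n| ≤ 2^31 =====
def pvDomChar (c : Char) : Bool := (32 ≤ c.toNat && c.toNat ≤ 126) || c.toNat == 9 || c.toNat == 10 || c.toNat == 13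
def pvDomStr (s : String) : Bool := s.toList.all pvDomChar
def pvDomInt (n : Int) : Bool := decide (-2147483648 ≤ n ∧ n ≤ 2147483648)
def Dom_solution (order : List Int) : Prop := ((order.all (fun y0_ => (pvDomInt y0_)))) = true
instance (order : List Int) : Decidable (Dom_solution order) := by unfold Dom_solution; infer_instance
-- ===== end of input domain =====

-- B iterates over the target sequence with lazy pushing instead of A's push-driven
-- outer loop with a greedy inner pop loop (alternative decomposition, same cost).


-- ===== PORT A =====
-- inner 'while sub and sub[-1] == order[flag]' loop; the stack 'sub' is kept with
-- its top as the list head (Python appends/pops at the right end).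
-- When order[flag] would raise IndexError (pyGet? = none) the Python loop condition
-- cannot be evaluated; that state is unreachable in A (then sub is always empty),
-- so returning the state unchanged there is faithful.
def aInner (order : List Int) : Int → List Int → Int → Int × List Int × Int
  | answer, [], flag => (answer, [], flag)
  | answer, t :: rest, flag =>
    match PySem.List.pyGet? order flag with
    | some v => if t = v then aInner order (answer + 1) rest (flag + 1) else (answer, t :: rest, flag)
    | none => (answer, t :: rest, flag)

-- outer 'while idx <= n' loop: push idx, then run the inner loop
def aOuter (order : List Int) (n idx : Int) (st : Int × List Int × Int) : Int × List Int × Int :=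
  if idx ≤ n then
    aOuter order n (idx + 1) (aInner order st.1 (idx :: st.2.1) st.2.2)
  else st
termination_by (n + 1 - idx).toNat
decreasing_by omega

def solution (order : List Int) : Int :=
  (aOuter order (order.length : Int) 1 (0, [], 0)).1

-- ===== PORT B =====
-- 'while cur <= v and cur <= n: stack.append(cur); cur += 1'
def pushPhase (n v cur : Int) (stack : List Int) : List Int × Int :=
  if cur ≤ v ∧ cur ≤ n then pushPhase n v (cur + 1) (cur :: stack) else (stack, cur)
termination_by (n + 1 - cur).toNat
decreasing_by omega

-- 'for v in order: … else break'
def bGo (n : Int) (stack : List Int) (cur ans : Int) : List Int → Int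
  | [] => ans
  | v :: rest =>
    match pushPhase n v cur stack with
    | (t :: s, c) => if t = v then bGo n s c (ans + 1) rest else ans
    | ([], _) => ans

def solution_alt (order : List Int) : Int :=
  bGo (order.length : Int) [] 1 0 order

-- ===== PRECONDITION & SPEC =====
def Spec_solution (order : List Int) (out : Int) : Prop := out = solution_alt order
instance (order : List Int) (out : Int) : Decidable (Spec_solution order out) := by unfold Spec_solution; infer_instance

-- ===== CLAIM (what is proved, stated in full; the proofs are below) =====
def Claim_equal_solution : Prop := ∀ (order : List Int), Dom_solution order → Spec_solution order (solution order)

-- ===== LEMMAS AND PROOFS =====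

-- Once the requested box order[flag] can never appear on top of the stack again
-- (it is out of range, or below the next index to push, or beyond n), the rest of
-- A's outer loop changes nothing but the stack.
theorem aOuter_stuck (order : List Int) (n : Int) :
    ∀ (k : Nat) (c : Int) (sub : List Int) (ans flag : Int),
      (n + 1 - c).toNat = k →
      (PySem.List.pyGet? order flag = none ∨
        ∃ v, PySem.List.pyGet? order flag = some v ∧ (v < c ∨ n < v)) →
      (aOuter order n c (ans, sub, flag)).1 = ans := by
  intro k
  induction k with
  | zero =>
    intro c sub ans flag hk _
    rw [aOuter]
    simp only [show ¬ c ≤ n by omega, if_false]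
  | succ k ih =>
    intro c sub ans flag hk hv
    rw [aOuter]
    by_cases hc : c ≤ n
    · simp only [hc, if_true]
      have hstep : aInner order ans (c :: sub) flag = (ans, c :: sub, flag) := by
        rcases hv with h | ⟨v, hv, hrng⟩
        · simp [aInner, h]
        · have : c ≠ v := by omega
          simp [aInner, hv, this]
      rw [hstep]
      refine ih (c + 1) (c :: sub) ans flag (by omega) ?_
      rcases hv with h | ⟨v, hv, hrng⟩
      · exact Or.inl h
      · exact Or.inr ⟨v, hv, by omega⟩
    · simp [hc]

-- The heart of the equivalence: one step of B (process order[flag] = v) matches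
-- A's lazy continuation.  Induction on the push phase (measure n + 1 - c).
theorem step_sim (order : List Int) (n : Int) (flag v : Int) (rest : List Int)
    (hget : PySem.List.pyGet? order flag = some v)
    (MAIN : ∀ (c' : Int) (sub' : List Int) (ans' : Int), 1 ≤ c' → c' ≤ n + 1 →
      (∀ x ∈ sub', x < c') →
      (aOuter order n c' (aInner order ans' sub' (flag + 1))).1 = bGo n sub' c' ans' rest) :
    ∀ (k : Nat) (c : Int) (sub : List Int) (ans : Int),
      (n + 1 - c).toNat = k → 1 ≤ c → c ≤ n + 1 → (∀ x ∈ sub, x < c) →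
      (aOuter order n c (aInner order ans sub flag)).1 = bGo n sub c ans (v :: rest) := by
  intro k
  induction k with
  | zero =>
    intro c sub ans flag' hc1 hc2 hsub
    -- c = n + 1: no pushing possible
    have hcn : ¬ (c ≤ v ∧ c ≤ n) := by omega
    rw [bGo, pushPhase]
    simp only [hcn, if_false]
    match sub, hsub with
    | [], _ =>
      simp only [aInner]
      rw [aOuter]
      simp [show ¬ c ≤ n by omega]
    | t :: s, hsub =>
      by_cases htv : t = v
      · subst htv
        simp only [aInner, hget, if_true]
        refine MAIN c s (ans + 1) hc1 hc2 ?_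
        intro x hx; exact hsub x (List.mem_cons_of_mem _ hx)
      · simp only [aInner, hget, htv, if_false]
        rw [aOuter]
        simp [show ¬ c ≤ n by omega]
  | succ k ih =>
    intro c sub ans hk hc1 hc2 hsub
    by_cases hpush : c ≤ v ∧ c ≤ n
    · -- push c and continue
      have hstep : aInner order ans sub flag = (ans, sub, flag) := by
        match sub, hsub with
        | [], _ => simp [aInner]
        | t :: s, hsub =>
          have : t ≠ v := by have := hsub t (List.mem_cons_self ..) ; omega
          simp [aInner, hget, this]
      conv_lhs => rw [hstep, aOuter]
      simp only [hpush.2, if_true]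
      conv_rhs => rw [bGo, pushPhase]
      simp only [hpush, and_self, if_true]
      have := ih (c + 1) (c :: sub) ans (by omega) (by omega) (by omega) (by
        intro x hx
        rcases List.mem_cons.mp hx with h | h
        · omega
        · have := hsub x h; omega)
      rw [this, bGo, pushPhase]
    · -- no push: pop if top matches, else stuck
      conv_rhs => rw [bGo, pushPhase]
      simp only [hpush, if_false]
      match sub, hsub with
      | [], _ =>
        simp only [aInner]
        exact aOuter_stuck order n _ c [] ans flag rfl
          (Or.inr ⟨v, hget, by omega⟩)
      | t :: s, hsub =>
        by_cases htv : t = v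
        · subst htv
          simp only [aInner, hget, if_true]
          refine MAIN c s (ans + 1) hc1 hc2 ?_
          intro x hx; exact hsub x (List.mem_cons_of_mem _ hx)
        · simp only [aInner, hget, htv, if_false]
          exact aOuter_stuck order n _ c (t :: s) ans flag rfl
            (Or.inr ⟨v, hget, by omega⟩)

-- Main simulation: A's remaining computation equals B's loop over the remaining
-- order suffix.  Induction on the suffix.
theorem main_sim (order : List Int) :
    ∀ (suffix : List Int) (flag c : Int) (sub : List Int) (ans : Int),
      0 ≤ flag → suffix = order.drop flag.toNat →
      1 ≤ c → c ≤ (order.length : Int) + 1 → (∀ x ∈ sub, x < c) →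
      (aOuter order (order.length : Int) c (aInner order ans sub flag)).1 =
        bGo (order.length : Int) sub c ans suffix := by
  intro suffix
  induction suffix with
  | nil =>
    intro flag c sub ans hf hdrop hc1 hc2 hsub
    have hlen : order.length ≤ flag.toNat := by
      by_contra h
      have := List.drop_eq_nil_iff.mp hdrop.symm
      omega
    have hnone : PySem.List.pyGet? order flag = none := by
      rw [PySem.List.pyGet?_of_nonneg order hf]
      exact List.getElem?_eq_none hlen
    have hstep : aInner order ans sub flag = (ans, sub, flag) := by
      match sub with
      | [] => simp [aInner]
      | t :: s => simp [aInner, hnone]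
    rw [hstep, bGo]
    exact aOuter_stuck order _ _ c sub ans flag rfl (Or.inl hnone)
  | cons v rest ih =>
    intro flag c sub ans hf hdrop hc1 hc2 hsub
    have hget : PySem.List.pyGet? order flag = some v := by
      rw [PySem.List.pyGet?_of_nonneg order hf]
      rw [← List.head?_drop, ← hdrop]; rfl
    have hrest : rest = order.drop ((flag + 1).toNat) := by
      have h1 : (flag + 1).toNat = flag.toNat + 1 := by omega
      rw [h1, ← List.drop_drop, ← hdrop]; rfl
    refine step_sim order _ flag v rest hget ?_ _ c sub ans rfl hc1 hc2 hsub
    intro c' sub' ans' hc1' hc2' hsub'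
    exact ih (flag + 1) c' sub' ans' (by omega) hrest hc1' hc2' hsub'

-- ===== VERDICT (by name: the statement is the Claim_ definition above) =====
theorem solution_spec : Claim_equal_solution := by
  intro order _
  unfold Spec_solution solution solution_alt
  have := main_sim order order 0 1 [] 0 le_rfl (by simp) (by omega) (by omega) (by simp)
  simpa [aInner] using this
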